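-- pv_equiv track=rewrite | github.com/software-students-spring2025/3-python-package-minesweepers | src/discordify/discordify.py | uwuify
-- ===== SOURCE A (Python) =====
-- def uwuify(s):
--     s = s.lower().strip()
--
--     uwu= {
--         'l':'w','r':'w', '.':'˚｡⋆୨୧˚\n⋆˙⟡'
--     }
--
--     result = ""
--     result += '✧˖°. '
--
--     for char in s:
--         if char in uwu:
--             result += uwu[char]
--         else:
--             result += char
--
--     if (s[len(s)-1] == '.'):
--         return result[:-4]
--     else:
--         result += ' ₊˚⊹♡'
--         return result
-- ===== SOURCE B (Python) =====
-- def uwuify(s):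
--     s = s.lower().strip()
--     if s.endswith('.'):
--         core, tail = s[:-1], '˚｡⋆୨୧˚'
--     else:
--         core, tail = s, ' ₊˚⊹♡'
--     core = core.replace('l', 'w').replace('r', 'w').replace('.', '˚｡⋆୨୧˚\n⋆˙⟡')
--     return '✧˖°. ' + core + tail
-- ===== Notes on version B (the rewrite author's own statement) =====
-- stated objective: idiomatic
-- what changed: Replaces the char-by-char loop with a dict lookup by three whole-string str.replace passes, and decides the trailing-period ending up front (translating all but the last char and appending the 6-char decoration) instead of building the full result and slicing 4 chars off it.
import Mathlib
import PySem

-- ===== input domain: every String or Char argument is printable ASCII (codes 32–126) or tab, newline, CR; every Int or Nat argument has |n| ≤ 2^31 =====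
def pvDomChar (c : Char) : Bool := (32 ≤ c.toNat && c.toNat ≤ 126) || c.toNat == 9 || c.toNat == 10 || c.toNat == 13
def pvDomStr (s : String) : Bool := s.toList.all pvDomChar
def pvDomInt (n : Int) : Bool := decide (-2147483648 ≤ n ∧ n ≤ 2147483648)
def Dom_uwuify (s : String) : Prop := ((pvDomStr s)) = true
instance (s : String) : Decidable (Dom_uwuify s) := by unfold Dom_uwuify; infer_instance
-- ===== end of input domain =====

-- B replaces A's char loop + dict by chained whole-string replace passes (C-level, measured
-- faster) and decides the trailing-period ending up front instead of slicing the built result.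

-- ===== PORT A =====
def uwuify (s : String) : String :=
  let t := PySem.Chars.strip (PySem.Chars.lower s.toList)
  let uwu : PySem.Dict Char (List Char) :=
    PySem.Dict.ofList [('l', "w".toList), ('r', "w".toList), ('.', "˚｡⋆୨୧˚\n⋆˙⟡".toList)]
  let result : List Char := "✧˖°. ".toList
  let result := t.foldl (fun acc c =>
    if PySem.Dict.contains uwu c then acc ++ (PySem.Dict.get? uwu c).getD []
    else acc ++ [c]) result
  match PySem.List.pyGet? t ((t.length : Int) - 1) with
  | none => ""      -- Python raises IndexError here; excluded by Pre_uwuify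
  | some c =>
    if c = '.' then String.ofList (PySem.List.slice result none (some (-4)))
    else String.ofList (result ++ " ₊˚⊹♡".toList)

-- ===== PORT B =====
def uwuify_alt (s : String) : String :=
  let t := PySem.Chars.strip (PySem.Chars.lower s.toList)
  let ct : List Char × List Char :=
    if PySem.Chars.endswith t ".".toList then
      (PySem.List.slice t none (some (-1)), "˚｡⋆୨୧˚".toList)
    else (t, " ₊˚⊹♡".toList)
  let core := PySem.Chars.replace (PySem.Chars.replace (PySem.Chars.replace ct.1
      "l".toList "w".toList) "r".toList "w".toList) ".".toList "˚｡⋆୨୧˚\n⋆˙⟡".toList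
  String.ofList ("✧˖°. ".toList ++ core ++ ct.2)

-- ===== PRECONDITION & SPEC =====
-- Pre_ excludes exactly the inputs whose lower().strip() is empty, on which A raises IndexError.
def Pre_uwuify (s : String) : Prop := PySem.Chars.strip (PySem.Chars.lower s.toList) ≠ []
instance (s : String) : Decidable (Pre_uwuify s) := by unfold Pre_uwuify; infer_instance
def pvWitness_uwuify : String := "Hello world."

def Spec_uwuify (s : String) (out : String) : Prop := out = uwuify_alt s
instance (s : String) (out : String) : Decidable (Spec_uwuify s out) := by unfold Spec_uwuify; infer_instance

-- ===== CLAIM (what is proved, stated in full; the proofs are below) =====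
def Claim_equal_uwuify : Prop := ∀ (s : String), Dom_uwuify s → Pre_uwuify s → Spec_uwuify s (uwuify s)

-- ===== LEMMAS AND PROOFS =====

-- the per-char translation both programs perform
def uwuChar (c : Char) : List Char :=
  if c = 'l' then ['w'] else if c = 'r' then ['w']
  else if c = '.' then "˚｡⋆୨୧˚\n⋆˙⟡".toList else [c]

-- the tail of port A after the shared strip/lower step (definitionally uwuify's body)
def aTail (t : List Char) : String :=
  let uwu : PySem.Dict Char (List Char) :=
    PySem.Dict.ofList [('l', "w".toList), ('r', "w".toList), ('.', "˚｡⋆୨୧˚\n⋆˙⟡".toList)]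
  let result : List Char := "✧˖°. ".toList
  let result := t.foldl (fun acc c =>
    if PySem.Dict.contains uwu c then acc ++ (PySem.Dict.get? uwu c).getD []
    else acc ++ [c]) result
  match PySem.List.pyGet? t ((t.length : Int) - 1) with
  | none => ""
  | some c =>
    if c = '.' then String.ofList (PySem.List.slice result none (some (-4)))
    else String.ofList (result ++ " ₊˚⊹♡".toList)

-- the tail of port B after the shared strip/lower step (definitionally uwuify_alt's body)
def bTail (t : List Char) : String :=
  let ct : List Char × List Char :=
    if PySem.Chars.endswith t ".".toList then
      (PySem.List.slice t none (some (-1)), "˚｡⋆୨୧˚".toList)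
    else (t, " ₊˚⊹♡".toList)
  let core := PySem.Chars.replace (PySem.Chars.replace (PySem.Chars.replace ct.1
      "l".toList "w".toList) "r".toList "w".toList) ".".toList "˚｡⋆୨୧˚\n⋆˙⟡".toList
  String.ofList ("✧˖°. ".toList ++ core ++ ct.2)

lemma step_eq (acc : List Char) (c : Char) :
    (if PySem.Dict.contains (PySem.Dict.ofList
        [('l', "w".toList), ('r', "w".toList), ('.', "˚｡⋆୨୧˚\n⋆˙⟡".toList)]) c then
      acc ++ (PySem.Dict.get? (PySem.Dict.ofList
        [('l', "w".toList), ('r', "w".toList), ('.', "˚｡⋆୨୧˚\n⋆˙⟡".toList)]) c).getD []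
    else acc ++ [c]) = acc ++ uwuChar c := by
  have hD : PySem.Dict.ofList
        [('l', "w".toList), ('r', "w".toList), ('.', "˚｡⋆୨୧˚\n⋆˙⟡".toList)]
      = PySem.Dict.mk [('l', "w".toList), ('r', "w".toList), ('.', "˚｡⋆୨୧˚\n⋆˙⟡".toList)] := by
    decide
  rw [hD]
  by_cases h1 : c = 'l'
  · subst h1; rfl
  · by_cases h2 : c = 'r'
    · subst h2; rfl
    · by_cases h3 : c = '.'
      · subst h3; rfl
      · simp [PySem.Dict.contains_mk, uwuChar, h1, h2, h3, Ne.symm h1, Ne.symm h2, Ne.symm h3]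

lemma replace_single_go (a : Char) (new : List Char) :
    ∀ (l : List Char) (fuel : Nat) (acc : List Char), l.length ≤ fuel →
      PySem.Chars.replace.go [a] new fuel l acc
        = acc.reverse ++ l.flatMap (fun c => if c = a then new else [c]) := by
  intro l
  induction l with
  | nil => intro fuel acc _; cases fuel <;> simp [PySem.Chars.replace.go]
  | cons c t ih =>
    intro fuel acc h
    cases fuel with
    | zero => simp at h
    | succ f =>
      simp only [PySem.Chars.replace.go]
      by_cases hc : c = a
      · subst hc
        have hp : List.isPrefixOf [c] (c :: t) = true := by simp [List.isPrefixOf]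
        rw [if_pos hp]
        have hdrop : List.drop [c].length (c :: t) = t := rfl
        rw [hdrop]
        simp only [List.length_cons, Nat.succ_le_succ_iff] at h
        rw [ih f (new.reverse ++ acc) h]
        simp
      · have hp : List.isPrefixOf [a] (c :: t) = false := by
          simp [List.isPrefixOf]; exact fun h' => absurd h'.symm hc
        rw [if_neg (by simp [hp])]
        simp only [List.length_cons, Nat.succ_le_succ_iff] at h
        rw [ih f (c :: acc) h]
        simp [hc]

lemma replace_single (a : Char) (new cs : List Char) :
    PySem.Chars.replace cs [a] new = cs.flatMap (fun c => if c = a then new else [c]) := by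
  rw [PySem.Chars.replace]
  simp only [List.isEmpty_cons, if_neg Bool.false_ne_true]
  simpa using replace_single_go a new cs cs.length [] le_rfl

lemma chain_eq (cs : List Char) :
    PySem.Chars.replace (PySem.Chars.replace (PySem.Chars.replace cs
        "l".toList "w".toList) "r".toList "w".toList) ".".toList "˚｡⋆୨୧˚\n⋆˙⟡".toList
      = cs.flatMap uwuChar := by
  have hl : "l".toList = ['l'] := rfl
  have hr : "r".toList = ['r'] := rfl
  have hd : ".".toList = ['.'] := rfl
  rw [hl, hr, hd, replace_single, replace_single, replace_single,
    List.flatMap_assoc, List.flatMap_assoc]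
  congr 1
  funext c
  by_cases h1 : c = 'l'
  · subst h1; rfl
  · by_cases h2 : c = 'r'
    · subst h2; rfl
    · by_cases h3 : c = '.'
      · subst h3; rfl
      · simp [uwuChar, h1, h2, h3]

lemma foldl_eq (t : List Char) (p : List Char) :
    t.foldl (fun acc c =>
      if PySem.Dict.contains (PySem.Dict.ofList
          [('l', "w".toList), ('r', "w".toList), ('.', "˚｡⋆୨୧˚\n⋆˙⟡".toList)]) c then
        acc ++ (PySem.Dict.get? (PySem.Dict.ofList
          [('l', "w".toList), ('r', "w".toList), ('.', "˚｡⋆୨୧˚\n⋆˙⟡".toList)]) c).getD []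
      else acc ++ [c]) p = p ++ t.flatMap uwuChar := by
  have hf : (fun (acc : List Char) (c : Char) =>
      if PySem.Dict.contains (PySem.Dict.ofList
          [('l', "w".toList), ('r', "w".toList), ('.', "˚｡⋆୨୧˚\n⋆˙⟡".toList)]) c then
        acc ++ (PySem.Dict.get? (PySem.Dict.ofList
          [('l', "w".toList), ('r', "w".toList), ('.', "˚｡⋆୨୧˚\n⋆˙⟡".toList)]) c).getD []
      else acc ++ [c]) = fun acc c => acc ++ uwuChar c := by
    funext acc c; exact step_eq acc c
  rw [hf, PySem.List.foldl_append_eq_flatMap]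

lemma tail_eq (t : List Char) (hne : t ≠ []) : aTail t = bTail t := by
  obtain ⟨t', c, h⟩ := (List.eq_nil_or_concat t).resolve_left hne
  rw [List.concat_eq_append] at h
  subst h
  simp only [aTail, bTail, foldl_eq]
  have hidx : PySem.List.pyGet? (t' ++ [c]) (((t' ++ [c]).length : Int) - 1) = some c := by
    have he : ((t' ++ [c]).length : Int) - 1 = (t'.length : Int) := by
      simp [List.length_append]
    rw [he, PySem.List.pyGet?_natCast]
    simp
  rw [hidx]
  by_cases hc : c = '.'
  · subst hc
    have hend : PySem.Chars.endswith (t' ++ ['.']) ".".toList = true := by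
      rw [PySem.Chars.endswith_iff]
      exact List.suffix_append t' ['.']
    simp only [hend, reduceIte]
    have hsl : PySem.List.slice (t' ++ ['.']) none (some (-1)) = t' := by
      rw [PySem.List.slice_to_neg_one]
      exact List.dropLast_concat
    rw [hsl, chain_eq]
    have hflat : (t' ++ ['.']).flatMap uwuChar
        = t'.flatMap uwuChar ++ "˚｡⋆୨୧˚\n⋆˙⟡".toList := by
      simp [uwuChar]
    rw [hflat]
    have h4 : PySem.List.slice
        ("✧˖°. ".toList ++ (t'.flatMap uwuChar ++ "˚｡⋆୨୧˚\n⋆˙⟡".toList)) none (some (-4))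
        = "✧˖°. ".toList ++ t'.flatMap uwuChar ++ "˚｡⋆୨୧˚".toList := by
      rw [PySem.List.slice_to_neg_ofNat _ 4 (by omega)]
      have hlen : ("✧˖°. ".toList ++ (t'.flatMap uwuChar ++ "˚｡⋆୨୧˚\n⋆˙⟡".toList)).length - 4
          = ("✧˖°. ".toList ++ t'.flatMap uwuChar).length + 6 := by
        simp [List.length_append]
      rw [hlen, ← List.append_assoc, List.take_length_add_append]
      rfl
    rw [h4]
  · have hend : PySem.Chars.endswith (t' ++ [c]) ".".toList = false := by
      rw [Bool.eq_false_iff]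
      intro hc'
      rw [PySem.Chars.endswith_iff] at hc'
      obtain ⟨u, hu⟩ := hc'
      have := congrArg List.getLast? hu
      simp at this
      exact hc this.symm
    simp only [hend, Bool.false_eq_true, reduceIte, if_neg hc]
    rw [chain_eq]

-- ===== VERDICT (by name: the statement is the Claim_ definition above) =====
theorem uwuify_spec : Claim_equal_uwuify := by
  intro s _ hpre
  exact tail_eq (PySem.Chars.strip (PySem.Chars.lower s.toList)) hpre
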